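-- pv_equiv track=rewrite | github.com/riscv-software-src/riscv-unified-db | ext/binutils-gdb/encoding.py | match_mask_to_encoding
-- ===== SOURCE A (Python) =====
-- def match_mask_to_encoding(match, mask, is_compressed=False):
--     """
--     Converts MATCH and MASK values into a binary encoding string with '0', '1', and '-'.
--
--     Args:
--         match (int): The MATCH_* integer value.
--         mask (int): The MASK_* integer value.
--         is_compressed (bool): Whether this is a compressed (16-bit) instruction
--
--     Returns:
--         encoding_str (str): A 16 or 32-character string representing the encoding.
--     """
--     encoding = []
--     # Use 15 for 16-bit instructions, 31 for 32-bit instructions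
--     max_bit = 15 if is_compressed else 31
--
--     for bit in range(max_bit, -1, -1):  # From max_bit to bit 0
--         mask_bit = (mask >> bit) & 1
--         if mask_bit:
--             match_bit = (match >> bit) & 1
--             encoding.append(str(match_bit))
--         else:
--             encoding.append('-')
--     encoding_str = ''.join(encoding)
--     return encoding_str
-- ===== SOURCE B (Python) =====
-- def _bin(x, n):
--     """n-character binary string of x (0 <= x < 2**n), most significant bit first."""
--     if n == 0:
--         return ''
--     return _bin(x >> 1, n - 1) + ('1' if x & 1 else '0')
--
--
-- def match_mask_to_encoding(match, mask, is_compressed=False):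
--     n = 16 if is_compressed else 32
--     mbits = _bin(match % (1 << n), n)
--     kbits = _bin(mask % (1 << n), n)
--     return ''.join(mc if kc == '1' else '-' for mc, kc in zip(mbits, kbits))
-- ===== Notes on version B (the rewrite author's own statement) =====
-- stated objective: alternative
-- what changed: B renders each value once as a fixed-width MSB-first binary string (after reducing it modulo 2^16/2^32) and produces the encoding by zipping the two strings character-wise, instead of A's counting loop that extracts each bit with a shift-and-mask and appends per bit.
import Mathlib
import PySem

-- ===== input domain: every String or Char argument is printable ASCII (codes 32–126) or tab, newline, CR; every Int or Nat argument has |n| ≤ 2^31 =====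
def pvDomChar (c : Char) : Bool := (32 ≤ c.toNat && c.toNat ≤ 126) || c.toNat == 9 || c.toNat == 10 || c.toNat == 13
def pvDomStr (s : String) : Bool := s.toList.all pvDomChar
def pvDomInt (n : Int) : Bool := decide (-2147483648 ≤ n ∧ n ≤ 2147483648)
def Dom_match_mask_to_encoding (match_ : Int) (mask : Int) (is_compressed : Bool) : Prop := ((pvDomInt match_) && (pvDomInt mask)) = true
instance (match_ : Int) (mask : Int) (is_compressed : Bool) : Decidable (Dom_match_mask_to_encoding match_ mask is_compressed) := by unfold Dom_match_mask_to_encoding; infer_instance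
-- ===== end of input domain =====

-- B renders each value once as a fixed-width binary string (after reducing it modulo 2^16/2^32)
-- and zips the two strings character-wise, instead of A's per-bit shift-and-mask loop (alternative).

-- ===== PORT A =====
def match_mask_to_encoding (match_ : Int) (mask : Int) (is_compressed : Bool) : String :=
  let maxBit : Int := if is_compressed then 15 else 31
  let encoding : List String :=
    (PySem.List.pyRange maxBit (-1) (-1)).foldl (fun acc bit =>
      let maskBit := PySem.Int.band (mask >>> bit.toNat) 1
      if maskBit ≠ 0 then
        let matchBit := PySem.Int.band (match_ >>> bit.toNat) 1
        acc ++ [PySem.Int.toStr matchBit]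
      else
        acc ++ ["-"]) []
  PySem.Str.join "" encoding

-- ===== PORT B =====
-- _bin from Source B: n-character binary of x, MSB first (built as the List Char of the string)
def pvBinChars (x : Int) (n : Nat) : List Char :=
  if n = 0 then []
  else pvBinChars (x >>> (1 : Nat)) (n - 1) ++ [if PySem.Int.band x 1 ≠ 0 then '1' else '0']

def match_mask_to_encoding_alt (match_ : Int) (mask : Int) (is_compressed : Bool) : String :=
  let n : Nat := if is_compressed then 16 else 32
  let mbits := pvBinChars (PySem.Int.mod match_ ((1 : Int) <<< n)) n
  let kbits := pvBinChars (PySem.Int.mod mask ((1 : Int) <<< n)) n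
  String.ofList (List.zipWith (fun mc kc => if kc = '1' then mc else '-') mbits kbits)

-- ===== PRECONDITION & SPEC =====
def Spec_match_mask_to_encoding (match_ : Int) (mask : Int) (is_compressed : Bool) (out : String) : Prop := out = match_mask_to_encoding_alt match_ mask is_compressed
instance (match_ : Int) (mask : Int) (is_compressed : Bool) (out : String) : Decidable (Spec_match_mask_to_encoding match_ mask is_compressed out) := by unfold Spec_match_mask_to_encoding; infer_instance

-- ===== CLAIM (what is proved, stated in full; the proofs are below) =====
def Claim_equal_match_mask_to_encoding : Prop := ∀ (match_ : Int) (mask : Int) (is_compressed : Bool), Dom_match_mask_to_encoding match_ mask is_compressed → Spec_match_mask_to_encoding match_ mask is_compressed (match_mask_to_encoding match_ mask is_compressed)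

-- ===== LEMMAS AND PROOFS =====

-- the character A emits, from the extracted match bit and mask bit
def pvCharA (matchBit maskBit : Int) : Char :=
  if maskBit ≠ 0 then (if matchBit ≠ 0 then '1' else '0') else '-'

lemma pv_band_one_cases (x : Int) : PySem.Int.band x 1 = 0 ∨ PySem.Int.band x 1 = 1 := by
  rw [PySem.Int.band_one, PySem.Int.mod_eq_emod_of_pos (by norm_num)]
  omega

lemma pv_toStr_band_one (x : Int) :
    (PySem.Int.toStr (PySem.Int.band x 1)).toList
      = [if PySem.Int.band x 1 ≠ 0 then '1' else '0'] := by
  rcases pv_band_one_cases x with h | h <;> rw [h] <;> decide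

lemma pv_shiftRight_shiftRight (x : Int) (m k : Nat) : (x >>> m) >>> k = x >>> (m + k) := by
  simp [Int.shiftRight_eq_div_pow, pow_add, Int.ediv_ediv_eq_ediv_mul]

-- reducing modulo 2^n does not change bits below n
lemma pv_mod_window (y : Int) (n b : Nat) (hb : b < n) :
    PySem.Int.band ((PySem.Int.mod y ((2 : Int) ^ n)) >>> b) 1 = PySem.Int.band (y >>> b) 1 := by
  rw [PySem.Int.band_one, PySem.Int.band_one,
    PySem.Int.mod_eq_emod_of_pos (b := 2) (by norm_num),
    PySem.Int.mod_eq_emod_of_pos (b := 2) (by norm_num),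
    PySem.Int.mod_eq_emod_of_pos (by positivity : (0:Int) < 2 ^ n)]
  simp only [Int.shiftRight_eq_div_pow]
  push_cast
  rw [Int.emod_def y ((2:Int) ^ n)]
  have h1 : y - (2:Int) ^ n * (y / 2 ^ n)
      = y + (2:Int) ^ b * (-((2:Int) ^ (n - b - 1) * 2 * (y / 2 ^ n))) := by
    have h2 : (2:Int) ^ n = 2 ^ b * (2 ^ (n - b - 1) * 2) := by
      rw [← pow_succ, ← pow_add]
      congr 1
      omega
    rw [h2]; ring
  rw [h1, Int.add_mul_ediv_left _ _ (by positivity : ((2:Int) ^ b) ≠ 0)]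
  have h3 : -((2:Int) ^ (n - b - 1) * 2 * (y / 2 ^ n))
      = 2 * (-((2:Int) ^ (n - b - 1) * (y / 2 ^ n))) := by ring
  rw [h3, Int.add_mul_emod_self_left]

lemma pv_range_reverse_succ (n : Nat) :
    (List.range (n + 1)).reverse = (List.range n).reverse.map (· + 1) ++ [0] := by
  simp [List.range_succ_eq_map, Nat.succ_eq_add_one]

-- pvBinChars as a map over descending bit positions
lemma pv_binChars_eq_map (n : Nat) (x : Int) :
    pvBinChars x n
      = (List.range n).reverse.map (fun (b : Nat) => if PySem.Int.band (x >>> b) 1 ≠ 0 then '1' else '0') := by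
  induction n generalizing x with
  | zero => simp [pvBinChars]
  | succ n ih =>
    rw [pvBinChars, if_neg (Nat.succ_ne_zero n), Nat.add_sub_cancel,
      pv_range_reverse_succ, List.map_append, List.map_map, ih]
    have hsh : ∀ b : Nat, x >>> (b + 1) = (x >>> (1 : Nat)) >>> b := fun b => by
      rw [pv_shiftRight_shiftRight, Nat.add_comm 1 b]
    congr 1
    · refine List.map_congr_left (fun b _ => ?_)
      simp [hsh b]
    · simp

lemma pv_zipWith_same {α β : Type} (f : α → α → β) (g h : Nat → α) (l : List Nat) :
    List.zipWith f (l.map g) (l.map h) = l.map (fun b => f (g b) (h b)) := by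
  induction l with
  | nil => rfl
  | cons a l ih => simp [ih]

-- generic two-branch append loop as a map
lemma pv_foldl_branch {α β : Type} (P : β → Prop) [DecidablePred P] (u v : β → α)
    (l : List β) (acc : List α) :
    l.foldl (fun a b => if P b then a ++ [u b] else a ++ [v b]) acc
      = acc ++ l.map (fun b => if P b then u b else v b) := by
  induction l generalizing acc with
  | nil => simp
  | cons x l ih =>
    simp only [List.foldl_cons, List.map_cons]
    rw [ih]
    split_ifs <;> simp

-- A's loop then join, over an arbitrary list of bit positions, as a char list
lemma pv_A_join (match_ mask : Int) (l : List Int) :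
    (PySem.Str.join "" (l.foldl (fun acc bit =>
        if PySem.Int.band (mask >>> bit.toNat) 1 ≠ 0 then
          acc ++ [PySem.Int.toStr (PySem.Int.band (match_ >>> bit.toNat) 1)]
        else acc ++ ["-"]) [])).toList
      = l.map (fun bit => pvCharA (PySem.Int.band (match_ >>> bit.toNat) 1)
          (PySem.Int.band (mask >>> bit.toNat) 1)) := by
  refine Eq.trans (congrArg (fun t => (PySem.Str.join "" t).toList)
    (pv_foldl_branch _ _ _ l [])) ?_
  simp only [List.nil_append, PySem.Str.toList_join, List.map_map]
  refine Eq.trans ?_ (PySem.Chars.join_nil_singletons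
    (l.map (fun bit => pvCharA (PySem.Int.band (match_ >>> bit.toNat) 1)
      (PySem.Int.band (mask >>> bit.toNat) 1))))
  refine congrArg₂ PySem.Chars.join rfl ?_
  rw [List.map_map]
  refine List.map_congr_left (fun bit _ => ?_)
  simp only [Function.comp_apply]
  unfold pvCharA
  split
  · exact pv_toStr_band_one _
  · decide

-- the two Int-shift spellings agree
lemma pv_shift_cast (x : Int) (b : Nat) : x >>> ((b : Nat) : Int) = x >>> b :=
  Int.shiftRight_natCast_right x b

-- the common core, for window size n
lemma pv_core (match_ mask : Int) (n : Nat) (l : List Int) (M : Int)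
    (hl : l = (List.range n).reverse.map (fun (b : Nat) => (b : Int)))
    (hM : M = (2 : Int) ^ n) :
    PySem.Str.join "" (l.foldl (fun acc bit =>
        if PySem.Int.band (mask >>> bit.toNat) 1 ≠ 0 then
          acc ++ [PySem.Int.toStr (PySem.Int.band (match_ >>> bit.toNat) 1)]
        else acc ++ ["-"]) [])
      = String.ofList (List.zipWith (fun mc kc => if kc = '1' then mc else '-')
          (pvBinChars (PySem.Int.mod match_ M) n) (pvBinChars (PySem.Int.mod mask M) n)) := by
  rw [hM, pv_binChars_eq_map, pv_binChars_eq_map, pv_zipWith_same]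
  have key : ∀ (s : String) (cs : List Char), s.toList = cs → s = String.ofList cs :=
    fun s cs h => by rw [← h, String.ofList_toList]
  refine key _ _ ((pv_A_join match_ mask l).trans ?_)
  rw [hl, List.map_map]
  refine List.map_congr_left (fun b hb => ?_)
  have hbn : b < n := by simpa using hb
  simp only [Function.comp_apply, Int.toNat_natCast]
  rw [pv_shift_cast match_ b, pv_shift_cast mask b,
    pv_mod_window match_ n b hbn, pv_mod_window mask n b hbn]
  unfold pvCharA
  split <;> simp

lemma pv_main (match_ mask : Int) (is_compressed : Bool) :
    match_mask_to_encoding match_ mask is_compressed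
      = match_mask_to_encoding_alt match_ mask is_compressed := by
  cases is_compressed with
  | true =>
    simp only [match_mask_to_encoding, match_mask_to_encoding_alt, if_pos]
    exact pv_core match_ mask 16 _ _ (by decide) (by decide)
  | false =>
    simp only [match_mask_to_encoding, match_mask_to_encoding_alt, Bool.false_eq_true, reduceIte]
    exact pv_core match_ mask 32 _ _ (by decide) (by decide)

-- ===== VERDICT (by name: the statement is the Claim_ definition above) =====
theorem match_mask_to_encoding_spec : Claim_equal_match_mask_to_encoding := by
  intro m k c _
  exact pv_main m k c
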